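-- pv_equiv track=rewrite | github.com/Lonelytravelor/WebCollie | src/collie_package/utilities/web_tasks.py | _render_ascii_table
-- ===== SOURCE A (Python) =====
-- def _render_ascii_table(headers, rows):
--     headers = [str(h) for h in headers]
--     normalized_rows = [[str(c) for c in row] for row in rows]
--     if not headers:
--         return ""
--
--     col_count = len(headers)
--     widths = [len(h) for h in headers]
--     for row in normalized_rows:
--         for idx in range(min(col_count, len(row))):
--             widths[idx] = max(widths[idx], len(row[idx]))
--
--     border = "+" + "+".join("-" * (w + 2) for w in widths) + "+"
--     header_line = "| " + " | ".join(headers[i].ljust(widths[i]) for i in range(col_count)) + " |"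
--     body_lines = []
--     for row in normalized_rows:
--         padded = []
--         for idx in range(col_count):
--             cell = row[idx] if idx < len(row) else ""
--             padded.append(cell.ljust(widths[idx]))
--         body_lines.append("| " + " | ".join(padded) + " |")
--
--     return "\n".join([border, header_line, border, *body_lines, border])
-- ===== SOURCE B (Python) =====
-- def _render_ascii_table(headers, rows):
--     headers = [str(h) for h in headers]
--     normalized = [[str(c) for c in row] for row in rows]
--     if not headers:
--         return ""
--     n = len(headers)
--     pad = [""] * n
--     k = min(n, max(map(len, normalized), default=0))
--     colmax = [max(map(len, col))
--               for col in zip(*[row[:k] + pad[len(row):k] for row in normalized])]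
--     widths = [max(len(headers[j]), colmax[j] if j < k else 0) for j in range(n)]
--     grid = [headers] + [row[:n] + pad[len(row):] for row in normalized]
--
--     def fmt(row):
--         return "| " + " | ".join(map(str.ljust, row, widths)) + " |"
--
--     border = "+" + "+".join("-" * (w + 2) for w in widths) + "+"
--     return "\n".join([border, fmt(grid[0]), border] + [fmt(r) for r in grid[1:]] + [border])
-- ===== Notes on version B (the rewrite author's own statement) =====
-- stated objective: alternative
-- what changed: B normalizes the body into a rectangular grid, computes column widths column-major (a zip(*...) transpose of the body block capped at the widest relevant column, merged with the header widths) instead of A's row-major in-place widths[] update loop, and renders the header and all body rows with one shared zip-based row formatter instead of A's two separate rendering paths; same asymptotic cost, most per-cell work in C-level map/zip/join.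
import Mathlib
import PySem

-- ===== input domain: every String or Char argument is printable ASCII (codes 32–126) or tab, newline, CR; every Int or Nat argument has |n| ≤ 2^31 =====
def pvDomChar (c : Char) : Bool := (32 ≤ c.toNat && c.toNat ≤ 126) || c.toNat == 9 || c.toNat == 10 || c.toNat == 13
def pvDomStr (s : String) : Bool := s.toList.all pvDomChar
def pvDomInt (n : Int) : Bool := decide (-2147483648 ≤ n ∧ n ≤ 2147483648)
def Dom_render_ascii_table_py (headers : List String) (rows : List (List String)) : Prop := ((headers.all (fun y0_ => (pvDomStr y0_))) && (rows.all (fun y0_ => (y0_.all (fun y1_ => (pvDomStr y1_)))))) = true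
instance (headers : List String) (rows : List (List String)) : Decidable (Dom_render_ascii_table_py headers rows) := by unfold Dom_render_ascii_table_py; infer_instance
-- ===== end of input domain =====

-- ===== PORT A =====
-- Re-implementation equivalence: B builds a uniform padded grid and renders header and body
-- with one row formatter over zip (objective: alternative decomposition, same asymptotic cost).
-- Strings are handled as List Char (String.toList / String.mk) so the kernel can evaluate;
-- str(x) on a str is the identity, so the str-conversions keep the cell values unchanged.

-- str.ljust: pad on the right with spaces to width w, never truncate (exact)
def pvLjust (cs : List Char) (w : Nat) : List Char := cs ++ List.replicate (w - cs.length) ' '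

-- A's inner loop: for idx in range(min(col_count, len(row))): widths[idx] = max(widths[idx], len(row[idx]))
def pvWidenA (n : Nat) (ws : List Nat) (row : List (List Char)) : List Nat :=
  (List.range (min n row.length)).foldl
    (fun ws idx => ws.set idx (max (ws.getD idx 0) ((row.getD idx []).length))) ws

def render_ascii_table_py (headers : List String) (rows : List (List String)) : String :=
  let headersC := headers.map String.toList
  let normalized := rows.map (fun row => row.map String.toList)
  if headersC.isEmpty then "" else
  let n := headersC.length
  let widths := normalized.foldl (pvWidenA n) (headersC.map List.length)
  let border := '+' :: (PySem.Chars.join ['+'] (widths.map (fun w => List.replicate (w + 2) '-')) ++ ['+'])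
  let header_line := '|' :: ' ' ::
    (PySem.Chars.join [' ', '|', ' ']
      ((List.range n).map (fun i => pvLjust (headersC.getD i []) (widths.getD i 0))) ++ [' ', '|'])
  let body_lines := normalized.map (fun row =>
    let padded := (List.range n).foldl (fun acc idx =>
      acc ++ [pvLjust (if idx < row.length then row.getD idx [] else []) (widths.getD idx 0)]) []
    '|' :: ' ' :: (PySem.Chars.join [' ', '|', ' '] padded ++ [' ', '|']))
  String.ofList (PySem.Chars.join ['\n'] ([border, header_line, border] ++ body_lines ++ [border]))

-- ===== PORT B =====
-- row[:n] + pad[len(row):] (pad = [""] * n, so the slice is n - len(row) copies of ""):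
-- normalize a body row to exactly n cells
def pvPadRow (n : Nat) (row : List (List Char)) : List (List Char) :=
  row.take n ++ List.replicate (n - row.length) []

-- zip(*grid): tuples of the i-th element of every row, stopping at the shortest row
def pyZipStar (rows : List (List (List Char))) : List (List (List Char)) :=
  if h : rows ≠ [] ∧ ∀ r ∈ rows, r ≠ [] then
    rows.map (fun r => r.headD []) :: pyZipStar (rows.map List.tail)
  else []
termination_by (rows.map List.length).sum
decreasing_by
  rw [List.map_attach_eq_pmap]
  rw [List.pmap_eq_map]
  simp only [List.map_map, Function.comp_def]
  rcases rows with _ | ⟨r0, t⟩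
  · exact absurd rfl h.1
  · have h0 : r0.tail.length < r0.length := by
      have hr := h.2 r0 (by simp)
      cases r0 with
      | nil => exact absurd rfl hr
      | cons a b => simp
    have ht : (t.map (fun a => a.tail.length)).sum ≤ (t.map List.length).sum :=
      List.sum_le_sum (fun r _ => by cases r <;> simp)
    simp only [List.map_cons, List.sum_cons]
    omega

-- fmt(row): "| " + " | ".join(map(str.ljust, row, widths)) + " |"  (2-ary map = map over zip)
def pvFmtRow (widths : List Nat) (row : List (List Char)) : List Char :=
  '|' :: ' ' ::
    (PySem.Chars.join [' ', '|', ' '] ((row.zip widths).map (fun cw => pvLjust cw.1 cw.2)) ++ [' ', '|'])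

def render_ascii_table_py_alt (headers : List String) (rows : List (List String)) : String :=
  let headersC := headers.map String.toList
  let normalized := rows.map (fun row => row.map String.toList)
  if headersC.isEmpty then "" else
  let n := headersC.length
  -- k = min(n, max(map(len, normalized), default=0)); max over Nats with default 0 is a fold from 0
  let k := min n ((normalized.map List.length).foldl max 0)
  -- colmax = [max(map(len, col)) for col in zip(*[row[:k] + pad[len(row):k] for row in normalized])]
  -- (row[:k] + pad[len(row):k] is exactly pvPadRow k row; each column is nonempty, lengths ≥ 0)
  let colmax := (pyZipStar (normalized.map (pvPadRow k))).map
      (fun col => (col.map List.length).foldl max 0)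
  -- widths = [max(len(headers[j]), colmax[j] if j < k else 0) for j in range(n)]
  let widths := (List.range n).map (fun j =>
      max (headersC.getD j []).length (if j < k then colmax.getD j 0 else 0))
  -- grid = [headers] + [padded rows]; grid[0] / grid[1:] below are inlined as headersC / the map
  let border := '+' :: (PySem.Chars.join ['+'] (widths.map (fun w => List.replicate (w + 2) '-')) ++ ['+'])
  String.ofList (PySem.Chars.join ['\n']
    ([border, pvFmtRow widths headersC, border] ++ (normalized.map (pvPadRow n)).map (pvFmtRow widths) ++ [border]))

-- ===== PRECONDITION & SPEC =====
def Spec_render_ascii_table_py (headers : List String) (rows : List (List String)) (out : String) : Prop := out = render_ascii_table_py_alt headers rows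
instance (headers : List String) (rows : List (List String)) (out : String) : Decidable (Spec_render_ascii_table_py headers rows out) := by unfold Spec_render_ascii_table_py; infer_instance

-- ===== CLAIM (what is proved, stated in full; the proofs are below) =====
def Claim_equal_render_ascii_table_py : Prop := ∀ (headers : List String) (rows : List (List String)), Dom_render_ascii_table_py headers rows → Spec_render_ascii_table_py headers rows (render_ascii_table_py headers rows)

-- ===== LEMMAS AND PROOFS =====

theorem getD_set (l : List Nat) (i j v : Nat) :
    (l.set i v).getD j 0 = if i = j ∧ j < l.length then v else l.getD j 0 := by
  rw [List.getD_eq_getElem?_getD, List.getD_eq_getElem?_getD, List.getElem?_set]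
  by_cases hij : i = j
  · subst hij
    by_cases h : i < l.length
    · simp [h]
    · simp [h]
  · simp [hij]

theorem foldl_set_length (f : List Nat → Nat → Nat) :
    ∀ (l : List Nat) (ws : List Nat),
    (l.foldl (fun ws idx => ws.set idx (f ws idx)) ws).length = ws.length := by
  intro l
  induction l with
  | nil => intro ws; rfl
  | cons a t ih => intro ws; simp only [List.foldl_cons]; rw [ih, List.length_set]

theorem setloop_getD (g : Nat → Nat) :
    ∀ (m : Nat) (ws : List Nat) (j : Nat), m ≤ ws.length →
    ((List.range m).foldl (fun ws idx => ws.set idx (max (ws.getD idx 0) (g idx))) ws).getD j 0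
      = if j < m then max (ws.getD j 0) (g j) else ws.getD j 0 := by
  intro m
  induction m with
  | zero => intro ws j _; simp
  | succ k ih =>
    intro ws j hm
    have hlen : ((List.range k).foldl (fun ws idx => ws.set idx (max (ws.getD idx 0) (g idx))) ws).length = ws.length :=
      foldl_set_length _ (List.range k) ws
    rw [List.range_succ, List.foldl_append, List.foldl_cons, List.foldl_nil, getD_set, hlen,
        ih ws k (by omega), if_neg (by omega : ¬ k < k), ih ws j (by omega)]
    by_cases hcase : k = j ∧ j < ws.length
    · obtain ⟨rfl, h2⟩ := hcase
      rw [if_pos ⟨rfl, h2⟩, if_pos (Nat.lt_succ_self k)]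
    · rw [if_neg hcase]
      by_cases h1 : j < k
      · rw [if_pos h1, if_pos (by omega)]
      · have hne : j ≠ k := by rintro rfl; exact hcase ⟨rfl, by omega⟩
        rw [if_neg h1, if_neg (by omega)]

theorem zip_map_eq_range_map {α β γ : Type} (f : α → β → γ) (d1 : α) (d2 : β) :
    ∀ (l1 : List α) (l2 : List β), l1.length = l2.length →
    (l1.zip l2).map (fun p => f p.1 p.2)
      = (List.range l1.length).map (fun i => f (l1.getD i d1) (l2.getD i d2)) := by
  intro l1
  induction l1 with
  | nil => intro l2 _; simp
  | cons a t ih =>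
    intro l2 h
    cases l2 with
    | nil => simp at h
    | cons b t2 =>
      simp only [List.length_cons] at h
      simp [List.range_succ_eq_map, List.map_map, Function.comp, ih t2 (by omega)]

theorem pvWidenA_length (n : Nat) (ws : List Nat) (row : List (List Char)) :
    (pvWidenA n ws row).length = ws.length := by
  unfold pvWidenA; exact foldl_set_length _ (List.range (min n row.length)) ws

theorem pvWidenA_getD (n : Nat) (row : List (List Char)) (ws : List Nat) (j : Nat)
    (hws : ws.length = n) (hj : j < n) :
    (pvWidenA n ws row).getD j 0 = max (ws.getD j 0) (row.getD j []).length := by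
  unfold pvWidenA
  rw [setloop_getD (fun idx => (row.getD idx []).length) (min n row.length) ws j (by omega)]
  by_cases h : j < min n row.length
  · rw [if_pos h]
  · rw [if_neg h]
    have hr : row.getD j [] = [] := by
      rw [List.getD_eq_getElem?_getD, List.getElem?_eq_none (by omega : row.length ≤ j)]; rfl
    rw [hr]
    simp

theorem widthsA_getD (n : Nat) :
    ∀ (rowsC : List (List (List Char))) (ws : List Nat), ws.length = n → ∀ j, j < n →
    (rowsC.foldl (pvWidenA n) ws).getD j 0
      = rowsC.foldl (fun a row => max a (row.getD j []).length) (ws.getD j 0) := by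
  intro rowsC
  induction rowsC with
  | nil => intro ws _ j _; simp
  | cons r t ih =>
    intro ws hws j hj
    simp only [List.foldl_cons]
    rw [ih (pvWidenA n ws r) (by rw [pvWidenA_length]; exact hws) j hj,
        pvWidenA_getD n r ws j hws hj]

theorem widthsA_length (n : Nat) :
    ∀ (rowsC : List (List (List Char))) (ws : List Nat),
    (rowsC.foldl (pvWidenA n) ws).length = ws.length := by
  intro rowsC
  induction rowsC with
  | nil => intro ws; rfl
  | cons r t ih => intro ws; simp only [List.foldl_cons]; rw [ih, pvWidenA_length]

theorem pvPadRow_length (n : Nat) (row : List (List Char)) : (pvPadRow n row).length = n := by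
  unfold pvPadRow; simp; omega

theorem pvPadRow_getD (n : Nat) (row : List (List Char)) (j : Nat) (hj : j < n) :
    (pvPadRow n row).getD j [] = row.getD j [] := by
  unfold pvPadRow
  rw [List.getD_eq_getElem?_getD, List.getD_eq_getElem?_getD, List.getElem?_append]
  by_cases h : j < row.length
  · rw [if_pos (by simp; omega), List.getElem?_take, if_pos hj]
  · rw [if_neg (by simp; omega), List.length_take, List.getElem?_replicate, if_pos (by omega),
        List.getElem?_eq_none (by omega : row.length ≤ j)]
    rfl

-- zip(*grid) of a rectangular grid is the list of its n columns
theorem pyZipStar_rect (n : Nat) :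
    ∀ (grid : List (List (List Char))), grid ≠ [] → (∀ r ∈ grid, r.length = n) →
    pyZipStar grid = (List.range n).map (fun j => grid.map (fun r => r.getD j [])) := by
  induction n with
  | zero =>
    intro grid hne hrect
    rw [pyZipStar]
    rw [dif_neg (by
      rintro ⟨-, hall⟩
      rcases grid with _ | ⟨r0, t⟩
      · exact hne rfl
      · have h1 := hall r0 (by simp)
        have h2 := hrect r0 (by simp)
        exact h1 (List.eq_nil_of_length_eq_zero h2))]
    simp
  | succ k ih =>
    intro grid hne hrect
    rw [pyZipStar]
    rw [dif_pos ⟨hne, fun r hr => by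
      have := hrect r hr; intro e; rw [e] at this; simp at this⟩]
    rw [ih (grid.map List.tail) (by simpa using hne)
        (by intro r hr; rw [List.mem_map] at hr; obtain ⟨r0, hr0, rfl⟩ := hr
            have := hrect r0 hr0; cases r0 with
            | nil => simp at this
            | cons a b => simp at this ⊢; omega)]
    rw [List.range_succ_eq_map, List.map_cons, List.map_map]
    congr 1
    · apply List.map_congr_left
      intro r hr
      have := hrect r hr
      cases r with
      | nil => simp at this
      | cons a b => rfl
    · apply List.map_congr_left
      intro j _
      rw [Function.comp_apply, List.map_map]
      apply List.map_congr_left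
      intro r hr
      have := hrect r hr
      cases r with
      | nil => simp at this
      | cons a b => rfl

theorem foldl_max_init {α : Type} (f : α → Nat) :
    ∀ (l : List α) (a : Nat),
    l.foldl (fun x r => max x (f r)) a = max a (l.foldl (fun x r => max x (f r)) 0) := by
  intro l
  induction l with
  | nil => intro a; simp
  | cons r t ih =>
    intro a
    simp only [List.foldl_cons]
    rw [ih (max a (f r)), ih (max 0 (f r))]
    omega

theorem foldl_max_of_zero {α : Type} (f : α → Nat) :
    ∀ (l : List α) (a : Nat), (∀ r ∈ l, f r = 0) →
    l.foldl (fun x r => max x (f r)) a = a := by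
  intro l
  induction l with
  | nil => intro a _; rfl
  | cons r t ih =>
    intro a h
    simp only [List.foldl_cons]
    rw [h r (by simp), ih _ (fun r hr => h r (by simp [hr]))]
    omega

theorem init_le_foldl_max : ∀ (xs : List Nat) (a : Nat), a ≤ xs.foldl max a := by
  intro xs
  induction xs with
  | nil => intro a; exact Nat.le_refl a
  | cons y t ih => intro a; exact Nat.le_trans (Nat.le_max_left a y) (ih (max a y))

theorem mem_le_foldl_max : ∀ (xs : List Nat) (a x : Nat), x ∈ xs → x ≤ xs.foldl max a := by
  intro xs
  induction xs with
  | nil => intro a x hx; simp at hx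
  | cons y t ih =>
    intro a x hx
    rcases List.mem_cons.1 hx with rfl | hx
    · exact Nat.le_trans (Nat.le_max_right a x) (init_le_foldl_max t (max a x))
    · exact ih (max a y) x hx

-- the row-major width loop of A equals the column-major width computation of B
theorem widths_eq (headersC : List (List Char)) (rowsC : List (List (List Char))) :
    rowsC.foldl (pvWidenA headersC.length) (headersC.map List.length)
      = (List.range headersC.length).map (fun j =>
          max (headersC.getD j []).length
            (if j < min headersC.length ((rowsC.map List.length).foldl max 0)
             then ((pyZipStar (rowsC.map
                      (pvPadRow (min headersC.length ((rowsC.map List.length).foldl max 0))))).map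
                    (fun col => (col.map List.length).foldl max 0)).getD j 0
             else 0)) := by
  apply List.ext_getElem
  · rw [widthsA_length]; simp
  · intro j h1 h2
    have hj : j < headersC.length := by
      rw [widthsA_length, List.length_map] at h1; exact h1
    rw [← List.getD_eq_getElem _ 0 h1, ← List.getD_eq_getElem _ 0 h2]
    rw [widthsA_getD headersC.length rowsC (headersC.map List.length) (by simp) j hj]
    conv_rhs => rw [List.getD_eq_getElem?_getD, List.getElem?_map, List.getElem?_range hj]
    simp only [Option.map_some, Option.getD_some]
    have hhd : (headersC.map List.length).getD j 0 = (headersC.getD j []).length := by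
      rw [List.getD_eq_getElem?_getD, List.getD_eq_getElem?_getD, List.getElem?_map]
      cases headersC[j]? <;> rfl
    rw [hhd]
    by_cases hk : j < min headersC.length ((rowsC.map List.length).foldl max 0)
    · rw [if_pos hk]
      rcases rowsC with _ | ⟨r0, t⟩
      · simp at hk
      · have hcol : ∀ (F : List (List Char) → Nat) (G : Nat → List (List Char)) (K : Nat),
            j < K → (((List.range K).map G).map F).getD j 0 = F (G j) := by
          intro F G K hK
          rw [List.map_map, List.getD_eq_getElem?_getD, List.getElem?_map,
              List.getElem?_range hK]
          rfl
        rw [pyZipStar_rect (min headersC.length (((r0 :: t).map List.length).foldl max 0))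
              ((r0 :: t).map (pvPadRow _)) (by simp)
              (by intro r hr; rw [List.mem_map] at hr
                  obtain ⟨r1, -, rfl⟩ := hr; exact pvPadRow_length _ _),
            hcol _ _ _ hk]
        simp only [List.map_map, List.foldl_map, Function.comp_def]
        rw [foldl_max_init (fun row => (row.getD j []).length) (r0 :: t)
              (headersC.getD j []).length]
        congr 1
        congr 1
        funext x r
        have hk' : j < min headersC.length (List.foldl (fun x y => max x y.length) 0 (r0 :: t)) := by
          rw [show List.foldl (fun x y => max x y.length) 0 (r0 :: t)
                = ((r0 :: t).map List.length).foldl max 0 from List.foldl_map.symm]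
          exact hk
        rw [pvPadRow_getD _ r j hk']
    · rw [if_neg hk]
      have hz : ∀ r ∈ rowsC, (r.getD j []).length = 0 := by
        intro r hr
        have hle : r.length ≤ (rowsC.map List.length).foldl max 0 :=
          mem_le_foldl_max (rowsC.map List.length) 0 r.length (List.mem_map_of_mem hr)
        rw [List.getD_eq_getElem?_getD, List.getElem?_eq_none (by omega : r.length ≤ j)]
        rfl
      rw [foldl_max_of_zero (fun r => (r.getD j []).length) rowsC _ hz]
      omega

-- a padded body cell of A equals the corresponding grid cell of B
theorem cellA_eq (n : Nat) (row : List (List Char)) (idx : Nat) (hidx : idx < n) :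
    (if idx < row.length then row.getD idx [] else []) = (pvPadRow n row).getD idx [] := by
  rw [pvPadRow_getD n row idx hidx]
  by_cases h : idx < row.length
  · rw [if_pos h]
  · rw [if_neg h, List.getD_eq_getElem?_getD, List.getElem?_eq_none (by omega : row.length ≤ idx)]
    rfl

-- ===== VERDICT (by name: the statement is the Claim_ definition above) =====
theorem render_ascii_table_py_spec : Claim_equal_render_ascii_table_py := by
  unfold Claim_equal_render_ascii_table_py
  intro headers rows _
  unfold Spec_render_ascii_table_py render_ascii_table_py render_ascii_table_py_alt
  simp only []
  by_cases hemp : (headers.map String.toList).isEmpty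
  · rw [if_pos hemp, if_pos hemp]
  · rw [if_neg hemp, if_neg hemp,
        ← widths_eq (headers.map String.toList) (rows.map (fun row => row.map String.toList))]
    set W := (rows.map (fun row => row.map String.toList)).foldl
        (pvWidenA (headers.map String.toList).length)
        ((headers.map String.toList).map List.length) with hWdef
    have hWlen : W.length = (List.map String.toList headers).length := by
      rw [hWdef, widthsA_length]; simp
    have hhead : pvFmtRow W (List.map String.toList headers)
        = '|' :: ' ' :: (PySem.Chars.join [' ', '|', ' ']
            (List.map (fun i => pvLjust ((List.map String.toList headers).getD i []) (W.getD i 0))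
              (List.range (List.map String.toList headers).length)) ++ [' ', '|']) := by
      unfold pvFmtRow
      rw [zip_map_eq_range_map pvLjust [] 0 (List.map String.toList headers) W hWlen.symm]
    have hbody : List.map (fun row =>
        '|' :: ' ' :: (PySem.Chars.join [' ', '|', ' ']
            (List.foldl (fun acc idx =>
                acc ++ [pvLjust (if idx < row.length then row.getD idx [] else []) (W.getD idx 0)])
              [] (List.range (List.map String.toList headers).length)) ++ [' ', '|']))
          (List.map (fun row => List.map String.toList row) rows)
        = List.map (pvFmtRow W ∘ pvPadRow (List.map String.toList headers).length)
            (List.map (fun row => List.map String.toList row) rows) := by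
      apply List.map_congr_left
      intro row _
      rw [Function.comp_apply]
      unfold pvFmtRow
      rw [PySem.List.foldl_append_singleton_eq_map
            (fun idx => pvLjust (if idx < row.length then row.getD idx [] else []) (W.getD idx 0)),
          zip_map_eq_range_map pvLjust [] 0 (pvPadRow (List.map String.toList headers).length row) W
            (by rw [pvPadRow_length, hWlen]),
          pvPadRow_length, List.nil_append]
      have hcells : List.map (fun idx =>
            pvLjust (if idx < row.length then row.getD idx [] else []) (W.getD idx 0))
            (List.range (List.map String.toList headers).length)
          = List.map (fun i =>
              pvLjust ((pvPadRow (List.map String.toList headers).length row).getD i []) (W.getD i 0))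
            (List.range (List.map String.toList headers).length) := by
        apply List.map_congr_left
        intro idx hidx
        rw [List.mem_range] at hidx
        rw [cellA_eq (List.map String.toList headers).length row idx hidx]
      rw [hcells]
    rw [hhead, hbody]
    simp only [List.map_map, Function.comp_assoc]
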